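-- pv_equiv track=rewrite | github.com/PetitCoinCoin/advent-of-code | 2023/day_05.py | map_item_1
-- ===== SOURCE A (Python) =====
-- def map_item_1(map_to: dict, item: int) -> int:
--     try:
--         source = max([x for x in map_to.keys() if x <= item])
--     except ValueError:
--         return item
--     delta = item - source
--     destination, count = map_to[source]
--     if delta >= count:
--         return item
--     return destination + delta
-- ===== SOURCE B (Python) =====
-- def map_item_1(map_to: dict, item: int) -> int:
--     keys = sorted(map_to)
--     # binary search: lo becomes the index just past the last key <= item
--     lo, hi = 0, len(keys)
--     while lo < hi:
--         mid = (lo + hi) // 2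
--         if keys[mid] <= item:
--             lo = mid + 1
--         else:
--             hi = mid
--     if lo == 0:
--         return item
--     source = keys[lo - 1]
--     destination, count = map_to[source]
--     delta = item - source
--     if delta >= count:
--         return item
--     return destination + delta
-- ===== Notes on version B (the rewrite author's own statement) =====
-- stated objective: alternative
-- what changed: Replaces A's linear comprehension + max() scan with a sorted key array and a hand-written binary search (bisect_right) that locates the largest key <= item; the empty/below-all cases fall out as index 0 instead of a ValueError.
import Mathlib
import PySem

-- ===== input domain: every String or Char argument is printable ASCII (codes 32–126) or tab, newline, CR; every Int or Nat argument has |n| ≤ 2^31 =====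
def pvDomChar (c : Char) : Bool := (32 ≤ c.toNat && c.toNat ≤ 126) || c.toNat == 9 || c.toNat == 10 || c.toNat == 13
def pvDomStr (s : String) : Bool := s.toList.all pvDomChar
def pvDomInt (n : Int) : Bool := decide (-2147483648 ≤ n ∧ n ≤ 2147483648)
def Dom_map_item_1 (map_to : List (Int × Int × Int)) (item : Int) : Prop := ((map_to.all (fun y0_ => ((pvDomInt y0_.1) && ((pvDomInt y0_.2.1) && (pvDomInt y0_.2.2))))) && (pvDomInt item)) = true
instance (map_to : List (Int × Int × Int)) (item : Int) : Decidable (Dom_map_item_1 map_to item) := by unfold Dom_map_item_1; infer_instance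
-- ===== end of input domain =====

-- B replaces A's linear max()-over-comprehension with a sorted key list plus a
-- hand-written binary search for the largest key ≤ item (objective: alternative).

-- ===== PORT A =====
def map_item_1 (map_to : List (Int × Int × Int)) (item : Int) : Int :=
  -- max([x for x in map_to.keys() if x <= item]); the ValueError on [] is the none branch
  match PySem.List.max? (((PySem.Dict.mk map_to).keys).filter (fun x => decide (x ≤ item))) (fun y => y) with
  | none => item
  | some source =>
      match (PySem.Dict.mk map_to).get? source with
      | some dc => if item - source ≥ dc.2 then item else dc.1 + (item - source)
      | none => item  -- unreachable: source is a key of the dict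

-- ===== PORT B =====
-- the while loop 'while lo < hi: …'; keys[mid] is in range whenever lo < hi ≤ len keys,
-- so getD is exact there
-- structural fuel (= hi - lo at the call site) only makes the loop total; the kernel can reduce it
def pvBisectF (keys : List Int) (item : Int) : Nat → Nat → Nat → Nat
  | 0, lo, _ => lo
  | fuel + 1, lo, hi =>
    if lo < hi then
      let mid := (lo + hi) / 2
      if keys.getD mid 0 ≤ item then pvBisectF keys item fuel (mid + 1) hi
      else pvBisectF keys item fuel lo mid
    else lo

def pvBisect (keys : List Int) (item : Int) (lo hi : Nat) : Nat :=
  pvBisectF keys item (hi - lo) lo hi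

def map_item_1_alt (map_to : List (Int × Int × Int)) (item : Int) : Int :=
  let keys := PySem.List.sorted (map_to.map Prod.fst) (fun x => x) false
  let lo := pvBisect keys item 0 keys.length
  if lo = 0 then item
  else
    let source := keys.getD (lo - 1) 0
    match (PySem.Dict.mk map_to).get? source with
    | some dc => if item - source ≥ dc.2 then item else dc.1 + (item - source)
    | none => item  -- unreachable: source is a key of the dict

-- ===== PRECONDITION & SPEC =====
def Spec_map_item_1 (map_to : List (Int × Int × Int)) (item : Int) (out : Int) : Prop := out = map_item_1_alt map_to item
instance (map_to : List (Int × Int × Int)) (item : Int) (out : Int) : Decidable (Spec_map_item_1 map_to item out) := by unfold Spec_map_item_1; infer_instance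

-- ===== CLAIM (what is proved, stated in full; the proofs are below) =====
def Claim_equal_map_item_1 : Prop := ∀ (map_to : List (Int × Int × Int)) (item : Int), Dom_map_item_1 map_to item → Spec_map_item_1 map_to item (map_item_1 map_to item)

-- ===== LEMMAS AND PROOFS =====

-- the binary-search invariant: the result r splits [lo, hi) into keys ≤ item (left of r)
-- and keys > item (from r on), stated at the two boundary indices
theorem pvBisectF_spec (keys : List Int) (item : Int) (fuel : Nat) :
    ∀ lo hi : Nat, hi - lo ≤ fuel → lo ≤ hi → hi ≤ keys.length →
    lo ≤ pvBisectF keys item fuel lo hi ∧ pvBisectF keys item fuel lo hi ≤ hi ∧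
    (lo < pvBisectF keys item fuel lo hi → keys.getD (pvBisectF keys item fuel lo hi - 1) 0 ≤ item) ∧
    (pvBisectF keys item fuel lo hi < hi → item < keys.getD (pvBisectF keys item fuel lo hi) 0) := by
  induction fuel with
  | zero =>
      intro lo hi hf hlo hhi
      simp only [pvBisectF]
      exact ⟨le_rfl, by omega, by omega, by omega⟩
  | succ fuel ih =>
      intro lo hi hf hlo hhi
      simp only [pvBisectF]
      by_cases h : lo < hi
      · rw [if_pos h]
        set mid := (lo + hi) / 2 with hmid
        have hmlo : lo ≤ mid := by omega
        have hmhi : mid < hi := by omega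
        by_cases hle : keys.getD mid 0 ≤ item
        · rw [if_pos hle]
          obtain ⟨i1, i2, i3, i4⟩ := ih (mid + 1) hi (by omega) (by omega) hhi
          refine ⟨by omega, i2, ?_, i4⟩
          intro _
          by_cases hm : mid + 1 < pvBisectF keys item fuel (mid + 1) hi
          · exact i3 hm
          · have : pvBisectF keys item fuel (mid + 1) hi = mid + 1 := by omega
            rw [this]; simpa using hle
        · rw [if_neg hle]
          obtain ⟨i1, i2, i3, i4⟩ := ih lo mid (by omega) (by omega) (by omega)
          refine ⟨i1, by omega, i3, ?_⟩
          intro _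
          by_cases hm : pvBisectF keys item fuel lo mid < mid
          · exact i4 hm
          · have : pvBisectF keys item fuel lo mid = mid := by omega
            rw [this]; omega
      · rw [if_neg h]
        exact ⟨le_rfl, by omega, by omega, by omega⟩

theorem pvBisect_spec (keys : List Int) (item : Int) (lo hi : Nat)
    (hlo : lo ≤ hi) (hhi : hi ≤ keys.length) :
    lo ≤ pvBisect keys item lo hi ∧ pvBisect keys item lo hi ≤ hi ∧
    (lo < pvBisect keys item lo hi → keys.getD (pvBisect keys item lo hi - 1) 0 ≤ item) ∧
    (pvBisect keys item lo hi < hi → item < keys.getD (pvBisect keys item lo hi) 0) :=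
  pvBisectF_spec keys item (hi - lo) lo hi le_rfl hlo hhi

-- ===== VERDICT (by name: the statement is the Claim_ definition above) =====
theorem map_item_1_spec : Claim_equal_map_item_1 := by
  intro map_to item _
  unfold Spec_map_item_1 map_item_1 map_item_1_alt
  simp only [PySem.Dict.keys_mk]
  set ks : List Int := map_to.map (fun x => x.1) with hks
  set s : List Int := PySem.List.sorted ks (fun x => x) false with hs
  have hperm : s.Perm ks := PySem.List.sorted_perm ks (fun x => x) false
  obtain ⟨h1, h2, h3, h4⟩ := pvBisect_spec s item 0 s.length (Nat.zero_le _) le_rfl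
  set r := pvBisect s item 0 s.length with hr
  by_cases hr0 : r = 0
  · -- no key ≤ item: A's filtered list is empty (ValueError branch), B's lo is 0
    have hall : ∀ x ∈ ks, ¬ x ≤ item := by
      intro x hx hxle
      have hxs : x ∈ s := hperm.mem_iff.mpr hx
      obtain ⟨i, hi, hxi⟩ := List.getElem_of_mem hxs
      have hlen : 0 < s.length := by omega
      have hlt : item < s.getD r 0 := h4 (by omega)
      rw [List.getD_eq_getElem s 0 (by omega)] at hlt
      have hmono : s[r] ≤ s[i] :=
        PySem.List.sorted_id_getElem_mono ks (p := r) (q := i) (by omega) hi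
      omega
    have hfilt : ks.filter (fun x => decide (x ≤ item)) = [] := by
      rw [List.filter_eq_nil_iff]
      intro x hx
      simpa using hall x hx
    rw [hfilt]
    simp [PySem.List.max?, hr0]
  · -- r ≥ 1: s[r-1] is the largest key ≤ item, which is exactly A's max
    have hr1 : r - 1 < s.length := by omega
    have hsrc_le : s[r-1] ≤ item := by
      have := h3 (by omega)
      rwa [List.getD_eq_getElem s 0 hr1] at this
    have hsrc_mem : s[r-1] ∈ ks := hperm.mem_iff.mp (List.getElem_mem hr1)
    have hmax : ∀ x ∈ ks, x ≤ item → x ≤ s[r-1] := by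
      intro x hx hxle
      obtain ⟨i, hi, hxi⟩ := List.getElem_of_mem (hperm.mem_iff.mpr hx)
      by_cases hir : i ≤ r - 1
      · have : s[i] ≤ s[r-1] :=
          PySem.List.sorted_id_getElem_mono ks (p := i) (q := r - 1) hir hr1
        omega
      · have hrlt : r < s.length := by omega
        have hlt : item < s.getD r 0 := h4 hrlt
        rw [List.getD_eq_getElem s 0 hrlt] at hlt
        have : s[r] ≤ s[i] :=
          PySem.List.sorted_id_getElem_mono ks (p := r) (q := i) (by omega) hi
        omega
    have hsrcf : s[r-1] ∈ ks.filter (fun x => decide (x ≤ item)) := by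
      simp [List.mem_filter, hsrc_mem, hsrc_le]
    rcases hmx : PySem.List.max? (ks.filter (fun x => decide (x ≤ item))) (fun y => y) with _ | m
    · rw [PySem.List.max?_eq_none_iff] at hmx
      rw [hmx] at hsrcf
      simp at hsrcf
    · have hm_mem := PySem.List.max?_mem hmx
      have hm_le : s[r-1] ≤ m := PySem.List.max?_isMax hmx _ hsrcf
      have hle_m : m ≤ s[r-1] := by
        simp only [List.mem_filter, decide_eq_true_eq] at hm_mem
        exact hmax m hm_mem.1 hm_mem.2
      have hmeq : m = s[r-1] := le_antisymm hle_m hm_le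
      have hgd : s.getD (r - 1) 0 = s[r-1] := List.getD_eq_getElem s 0 hr1
      rw [if_neg hr0, hgd, hmeq]
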